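-- pv_equiv track=rewrite | github.com/cariocaservicesoficial3-code/Extrator_token_full | src/emailnator_module.py | find_best_link
-- ===== SOURCE A (Python) =====
-- def find_best_link(links, pattern):
--     """Encontra o melhor link com o padrão especificado."""
--     for link in links:
--         if "sendgrid" in link.lower() and pattern.lower() in link.lower():
--             return link
--
--     sendgrid_links = [l for l in links if "sendgrid" in l.lower()]
--     if sendgrid_links and pattern == "sendgrid":
--         for link in sendgrid_links:
--             if "unsubscribe" not in link.lower() and "open" not in link.lower():
--                 return link
--         return sendgrid_links[0]
--
--     for link in links:
--         if pattern.lower() in link.lower():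
--             return link
--
--     return None
-- ===== SOURCE B (Python) =====
-- def find_best_link(links, pattern):
--     """Encontra o melhor link com o padrão especificado."""
--     first_pattern = None
--     for link in links:
--         low = link.lower()
--         if pattern.lower() in low:
--             if "sendgrid" in low:
--                 return link
--             if first_pattern is None:
--                 first_pattern = link
--     return first_pattern
-- ===== Notes on version B (the rewrite author's own statement) =====
-- stated objective: simpler
-- what changed: One single pass keeping the first pattern-only candidate and returning immediately on a sendgrid+pattern match, instead of three sequential scans; A's unsubscribe/open block is dead code (when pattern=='sendgrid' the first loop already returns any sendgrid link) and is dropped.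
import Mathlib
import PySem

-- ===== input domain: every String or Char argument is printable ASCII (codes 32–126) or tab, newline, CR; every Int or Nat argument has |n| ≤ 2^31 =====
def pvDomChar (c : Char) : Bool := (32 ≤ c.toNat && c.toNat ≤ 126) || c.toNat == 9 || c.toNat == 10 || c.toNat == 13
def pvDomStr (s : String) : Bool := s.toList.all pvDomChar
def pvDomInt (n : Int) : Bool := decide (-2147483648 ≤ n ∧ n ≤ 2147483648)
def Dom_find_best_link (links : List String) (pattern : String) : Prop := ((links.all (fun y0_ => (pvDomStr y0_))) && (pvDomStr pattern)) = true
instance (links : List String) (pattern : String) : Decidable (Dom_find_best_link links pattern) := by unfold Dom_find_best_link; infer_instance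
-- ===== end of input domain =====

-- B is a single pass with two early-set candidates instead of A's three sequential scans
-- (A's middle unsubscribe/open block is unreachable); same return value, no speed claim.

-- ===== PORT A =====
-- first loop: return link if "sendgrid" in link.lower() and pattern.lower() in link.lower()
def fbl_loop1 (links : List String) (pattern : String) : Option String :=
  match links with
  | [] => none
  | l :: rest =>
    if PySem.Str.isIn "sendgrid" (PySem.Str.lower l)
        && PySem.Str.isIn (PySem.Str.lower pattern) (PySem.Str.lower l) then some l
    else fbl_loop1 rest pattern

-- middle loop over sendgrid_links: first link without "unsubscribe"/"open"
def fbl_loop2 (sl : List String) : Option String :=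
  match sl with
  | [] => none
  | l :: rest =>
    if !(PySem.Str.isIn "unsubscribe" (PySem.Str.lower l))
        && !(PySem.Str.isIn "open" (PySem.Str.lower l)) then some l
    else fbl_loop2 rest

-- third loop: first link with pattern.lower() in link.lower()
def fbl_loop3 (links : List String) (pattern : String) : Option String :=
  match links with
  | [] => none
  | l :: rest =>
    if PySem.Str.isIn (PySem.Str.lower pattern) (PySem.Str.lower l) then some l
    else fbl_loop3 rest pattern

def find_best_link (links : List String) (pattern : String) : Option String :=
  match fbl_loop1 links pattern with
  | some l => some l
  | none =>
    let sendgrid_links := links.filter (fun l => PySem.Str.isIn "sendgrid" (PySem.Str.lower l))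
    if !sendgrid_links.isEmpty && pattern == "sendgrid" then
      match fbl_loop2 sendgrid_links with
      | some l => some l
      | none => sendgrid_links.head?   -- sendgrid_links[0]; the guard ensures the list is nonempty
    else fbl_loop3 links pattern

-- ===== PORT B =====
def fbl_go (links : List String) (pattern : String) (first_pattern : Option String) : Option String :=
  match links with
  | [] => first_pattern
  | l :: rest =>
    let low := PySem.Str.lower l
    if PySem.Str.isIn (PySem.Str.lower pattern) low then
      if PySem.Str.isIn "sendgrid" low then some l
      else fbl_go rest pattern (if first_pattern.isNone then some l else first_pattern)
    else fbl_go rest pattern first_pattern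

def find_best_link_alt (links : List String) (pattern : String) : Option String :=
  fbl_go links pattern none

-- ===== PRECONDITION & SPEC =====
def Spec_find_best_link (links : List String) (pattern : String) (out : Option String) : Prop := out = find_best_link_alt links pattern
instance (links : List String) (pattern : String) (out : Option String) : Decidable (Spec_find_best_link links pattern out) := by unfold Spec_find_best_link; infer_instance

-- ===== CLAIM (what is proved, stated in full; the proofs are below) =====
def Claim_equal_find_best_link : Prop := ∀ (links : List String) (pattern : String), Dom_find_best_link links pattern → Spec_find_best_link links pattern (find_best_link links pattern)

-- ===== LEMMAS AND PROOFS =====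

-- B's single pass equals: first both-match, else first_pattern, else first pattern-match
theorem fbl_go_spec (links : List String) (pattern : String) (fp : Option String) :
    fbl_go links pattern fp =
      match fbl_loop1 links pattern with
      | some l => some l
      | none => fp.or (fbl_loop3 links pattern) := by
  induction links generalizing fp with
  | nil => cases fp <;> simp [fbl_go, fbl_loop1, fbl_loop3]
  | cons l rest ih =>
    by_cases hp : PySem.Chars.isIn (PySem.Chars.lower pattern.toList) (PySem.Chars.lower l.toList) = true
    · by_cases hs : PySem.Chars.isIn ['s', 'e', 'n', 'd', 'g', 'r', 'i', 'd'] (PySem.Chars.lower l.toList) = true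
      · simp [fbl_go, fbl_loop1, hp, hs]
      · simp only [fbl_go, fbl_loop1, fbl_loop3]
        simp [hp, hs]
        rw [ih]
        cases h1 : fbl_loop1 rest pattern <;> cases fp <;> simp [Option.or]
    · simp only [fbl_go, fbl_loop1, fbl_loop3]
      simp [hp]
      rw [ih]

theorem fbl_loop1_none_mem (links : List String) (pattern : String) :
    fbl_loop1 links pattern = none →
    ∀ l ∈ links, (PySem.Str.isIn "sendgrid" (PySem.Str.lower l)
        && PySem.Str.isIn (PySem.Str.lower pattern) (PySem.Str.lower l)) = false := by
  induction links with
  | nil => intro _ l hl; simp at hl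
  | cons a rest ih =>
    intro h l hl
    simp only [fbl_loop1] at h
    split at h
    · exact absurd h (by simp)
    next hc =>
      rcases List.mem_cons.mp hl with rfl | hl'
      · simpa using hc
      · exact ih h l hl'

-- when pattern = "sendgrid" and the first loop found nothing, there is no sendgrid link at all
theorem fbl_filter_nil (links : List String)
    (h : fbl_loop1 links "sendgrid" = none) :
    links.filter (fun l => PySem.Str.isIn "sendgrid" (PySem.Str.lower l)) = [] := by
  rw [List.filter_eq_nil_iff]
  intro l hl
  have hmem := fbl_loop1_none_mem links "sendgrid" h l hl
  have hlow : PySem.Str.lower "sendgrid" = "sendgrid" := by decide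
  rw [hlow, Bool.and_self] at hmem
  simp only [Bool.not_eq_true]
  exact hmem

-- ===== VERDICT (by name: the statement is the Claim_ definition above) =====
theorem find_best_link_spec : Claim_equal_find_best_link := by
  intro links pattern _
  unfold Spec_find_best_link find_best_link find_best_link_alt
  rw [fbl_go_spec]
  cases h1 : fbl_loop1 links pattern with
  | some l => simp
  | none =>
    by_cases hp : pattern = "sendgrid"
    · subst hp
      simp only [fbl_filter_nil links h1]
      simp
    · have hb : (pattern == "sendgrid") = false := beq_eq_false_iff_ne.mpr hp
      simp [hb]
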